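-- pv_equiv track=rewrite | github.com/maximilianoarevalo/Sisteco | Lab3/playfair.py | separateIdentical
-- ===== SOURCE A (Python) =====
-- def separateIdentical(message):
-- 	iterator = 0
-- 	modifiedMessage = ""
-- 	while(iterator < len(message)):
-- 		modifiedMessage = modifiedMessage + message[iterator]
-- 		if (iterator == len(message) - 1):
-- 			break
-- 		elif (message[iterator] == message[iterator+1]):
-- 			modifiedMessage = modifiedMessage + "x"
-- 		iterator = iterator + 1
-- 	return modifiedMessage
-- ===== SOURCE B (Python) =====
-- def separateIdentical(message):
--     # Run-length decomposition: split the message into maximal runs of one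
--     # repeated character, render each run with 'x'.join, and concatenate.
--     parts = []
--     rest = message
--     while rest:
--         c = rest[0]
--         k = 0
--         while k < len(rest) and rest[k] == c:
--             k += 1
--         parts.append('x'.join(rest[:k]))
--         rest = rest[k:]
--     return ''.join(parts)
-- ===== Notes on version B (the rewrite author's own statement) =====
-- stated objective: faster
-- what changed: Replaces A's single index walk with quadratic string concatenation by a run-length decomposition: an outer loop slices the message into maximal runs of one repeated character, each run is rendered by str.join with the separator letter, and the parts are joined once at the end.
import Mathlib
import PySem

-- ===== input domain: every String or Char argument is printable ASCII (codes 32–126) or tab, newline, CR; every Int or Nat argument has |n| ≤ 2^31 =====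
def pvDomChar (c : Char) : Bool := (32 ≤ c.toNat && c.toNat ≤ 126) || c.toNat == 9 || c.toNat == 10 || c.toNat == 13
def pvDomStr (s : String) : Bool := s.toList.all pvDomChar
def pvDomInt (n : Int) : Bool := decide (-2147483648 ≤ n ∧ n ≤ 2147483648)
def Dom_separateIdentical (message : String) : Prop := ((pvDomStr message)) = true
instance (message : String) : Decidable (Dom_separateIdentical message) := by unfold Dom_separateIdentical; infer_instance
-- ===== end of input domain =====

-- B replaces A's index walk (with quadratic concatenation) by a run-length decomposition:
-- slice the message into maximal runs of one repeated character, render each run with 'x'.join,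
-- and concatenate the parts once.

-- ===== PORT A =====
-- A's while loop over an increasing index, transcribed as recursion on the remaining indices.
def separateIdenticalLoop (cs : List Char) (iterator : Nat) (modifiedMessage : List Char) : List Char :=
  if _h : iterator < cs.length then
    let modifiedMessage := modifiedMessage ++ [cs.getD iterator ' ']
    if iterator == cs.length - 1 then
      modifiedMessage
    else if cs.getD iterator ' ' == cs.getD (iterator + 1) ' ' then
      separateIdenticalLoop cs (iterator + 1) (modifiedMessage ++ ['x'])
    else
      separateIdenticalLoop cs (iterator + 1) modifiedMessage
  else
    modifiedMessage
  termination_by cs.length - iterator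

def separateIdentical (message : String) : String :=
  String.ofList (separateIdenticalLoop message.toList 0 [])

-- ===== PORT B =====
-- inner while: `k = 0; while k < len(rest) and rest[k] == c: k += 1`
def runLenLoop (rest : List Char) (c : Char) (k : Nat) : Nat :=
  if _h : k < rest.length ∧ rest.getD k ' ' == c then
    runLenLoop rest c (k + 1)
  else
    k
  termination_by rest.length - k
  decreasing_by omega

-- termination fact the outer loop's recursion needs: the run length from 0 is ≥ 1 on a nonempty rest
theorem runLenLoop_ge (rest : List Char) (c : Char) (k : Nat) : k ≤ runLenLoop rest c k := by
  fun_induction runLenLoop with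
  | case1 k h ih => omega
  | case2 k h => omega

theorem runLenLoop_pos (rest : List Char) (h : rest ≠ []) :
    1 ≤ runLenLoop rest (rest.getD 0 ' ') 0 := by
  cases rest with
  | nil => simp at h
  | cons a tl =>
    rw [runLenLoop]
    have h0 : 0 < (a :: tl).length ∧ (a :: tl).getD 0 ' ' == (a :: tl).getD 0 ' ' := by simp
    rw [dif_pos h0]
    exact runLenLoop_ge _ _ _

-- outer while: slice off one maximal run at a time, collecting `'x'.join(rest[:k])`
def sepOuterLoop (rest : List Char) (parts : List (List Char)) : List (List Char) :=
  if h : rest = [] then parts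
  else
    let c := rest.getD 0 ' '
    let k := runLenLoop rest c 0
    sepOuterLoop (rest.drop k) (parts ++ [(rest.take k).intersperse 'x'])
  termination_by rest.length
  decreasing_by
    have h1 := runLenLoop_pos rest h
    have h2 : 0 < rest.length := by cases rest <;> simp_all
    simp only [List.length_drop]
    omega

def separateIdentical_alt (message : String) : String :=
  String.ofList ((sepOuterLoop message.toList []).flatten)

-- ===== PRECONDITION & SPEC =====
def Spec_separateIdentical (message : String) (out : String) : Prop := out = separateIdentical_alt message
instance (message : String) (out : String) : Decidable (Spec_separateIdentical message out) := by unfold Spec_separateIdentical; infer_instance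

-- ===== CLAIM (what is proved, stated in full; the proofs are below) =====
def Claim_equal_separateIdentical : Prop := ∀ (message : String), Dom_separateIdentical message → Spec_separateIdentical message (separateIdentical message)

-- ===== LEMMAS AND PROOFS =====

-- common recursive characterisation of the result
def sepSpec : List Char → List Char
  | [] => []
  | [c] => [c]
  | c :: d :: rest => if c == d then c :: 'x' :: sepSpec (d :: rest) else c :: sepSpec (d :: rest)

theorem loop_eq_spec (l : List Char) (cs : List Char) (it : Nat) (acc : List Char)
    (h : l = cs.drop it) : separateIdenticalLoop cs it acc = acc ++ sepSpec l := by
  induction l generalizing it acc with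
  | nil =>
    rw [separateIdenticalLoop]
    have hge : ¬ it < cs.length := by
      have := (List.drop_eq_nil_iff).mp h.symm
      omega
    simp [hge, sepSpec]
  | cons c rest ih =>
    have hlt : it < cs.length := by
      by_contra hge
      have hnil : cs.drop it = [] := List.drop_eq_nil_of_le (by omega)
      rw [hnil] at h; simp at h
    have hc : cs[it]? = some c := by
      have h0 : (cs.drop it)[0]? = some c := by rw [← h]; rfl
      rw [List.getElem?_drop] at h0
      simpa using h0
    rw [separateIdenticalLoop]
    simp only [dif_pos hlt]
    cases rest with
    | nil =>
      have hlast : (it == cs.length - 1) = true := by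
        have := congrArg List.length h
        simp [List.length_drop] at this
        simp; omega
      simp [hlast, List.getD, hc, sepSpec]
    | cons d rest' =>
      have hlen : it + 2 ≤ cs.length := by
        have := congrArg List.length h
        simp [List.length_drop] at this; omega
      have hdrop : cs.drop (it + 1) = d :: rest' := by
        have hh : cs.drop it = c :: d :: rest' := h.symm
        have := congrArg List.tail hh
        simpa [List.tail_drop] using this
      have hne : (it == cs.length - 1) = false := by simp; omega
      have hd : cs[it + 1]? = some d := by
        have h0 : (cs.drop (it + 1))[0]? = some d := by rw [hdrop]; rfl
        rw [List.getElem?_drop] at h0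
        simpa using h0
      simp only [hne, Bool.false_eq_true, if_false, List.getD, hc, hd, Option.getD_some]
      by_cases heq : c = d
      · have hbe : (c == d) = true := by simp [heq]
        simp only [hbe, if_true]
        rw [ih (it + 1) _ hdrop.symm]
        simp [sepSpec, hbe]
      · have hbe : (c == d) = false := by simp [heq]
        simp only [hbe, Bool.false_eq_true, if_false]
        rw [ih (it + 1) _ hdrop.symm]
        simp [sepSpec, hbe]

-- drop at an in-range index exposes that element
theorem drop_cons_getD (rest : List Char) (k : Nat) (hk : k < rest.length) :
    rest.drop k = rest.getD k ' ' :: rest.drop (k + 1) := by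
  rw [List.getD_eq_getElem rest ' ' hk]
  exact List.drop_eq_getElem_cons hk

-- the inner loop computes k + length of the leading run of c in rest.drop k
theorem runLenLoop_eq (rest : List Char) (c : Char) (k : Nat) :
    runLenLoop rest c k = k + ((rest.drop k).takeWhile (· == c)).length := by
  fun_induction runLenLoop with
  | case1 k h ih =>
    obtain ⟨hk, hc⟩ := h
    rw [ih, drop_cons_getD rest k hk, List.takeWhile_cons, if_pos hc]
    simp; omega
  | case2 k h =>
    by_cases hk : k < rest.length
    · have hc : ¬ ((rest.getD k ' ' == c) = true) := fun hc => h ⟨hk, hc⟩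
      rw [drop_cons_getD rest k hk, List.takeWhile_cons, if_neg hc]
      simp
    · rw [List.drop_eq_nil_of_le (by omega)]
      simp

-- take/drop at the takeWhile length are takeWhile/dropWhile
theorem take_len_takeWhile (p : Char → Bool) (l : List Char) :
    l.take (l.takeWhile p).length = l.takeWhile p := by
  induction l with
  | nil => simp
  | cons a tl ih =>
    rw [List.takeWhile_cons]
    by_cases h : p a = true
    · rw [if_pos h]; simp [List.take_succ_cons, ih]
    · rw [if_neg h]; simp

theorem drop_len_takeWhile (p : Char → Bool) (l : List Char) :
    l.drop (l.takeWhile p).length = l.dropWhile p := by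
  induction l with
  | nil => simp
  | cons a tl ih =>
    rw [List.takeWhile_cons, List.dropWhile_cons]
    by_cases h : p a = true
    · rw [if_pos h, if_pos h]; simpa using ih
    · rw [if_neg h, if_neg h]; simp

-- the leading run is a replicate of its head
theorem takeWhile_eq_replicate (l : List Char) (c : Char) :
    l.takeWhile (· == c) = List.replicate ((l.takeWhile (· == c)).length) c := by
  induction l with
  | nil => simp
  | cons a tl ih =>
    rw [List.takeWhile_cons]
    by_cases h : (a == c) = true
    · rw [if_pos h]
      have : a = c := by simpa using h
      simp [this, List.replicate_succ, ← ih]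
    · rw [if_neg h]; simp

-- head of dropWhile fails the predicate
theorem head_dropWhile_ne (l : List Char) (c : Char) (y : Char) (ys : List Char)
    (h : l.dropWhile (· == c) = y :: ys) : (y == c) = false := by
  induction l with
  | nil => simp at h
  | cons a tl ih =>
    rw [List.dropWhile_cons] at h
    by_cases ha : (a == c) = true
    · rw [if_pos ha] at h; exact ih h
    · rw [if_neg ha] at h
      cases h; simpa using ha

-- sepSpec over a nonempty run of c, followed by something not starting with c
theorem sepSpec_run (k : Nat) (c : Char) (rest2 : List Char)
    (h : ∀ y ys, rest2 = y :: ys → (y == c) = false) :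
    sepSpec (List.replicate (k + 1) c ++ rest2)
      = (List.replicate (k + 1) c).intersperse 'x' ++ sepSpec rest2 := by
  induction k with
  | zero =>
    cases rest2 with
    | nil => simp [sepSpec]
    | cons y ys =>
      have hy := h y ys rfl
      have hyc : ¬ c = y := fun hcy => by simp [hcy] at hy
      simp [sepSpec, hyc]
  | succ n ih =>
    have hrep : List.replicate (n + 2) c ++ rest2 = c :: (List.replicate (n + 1) c ++ rest2) := by
      simp [List.replicate_succ]
    have hhead : List.replicate (n + 1) c ++ rest2 = c :: (List.replicate n c ++ rest2) := by
      simp [List.replicate_succ]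
    rw [hrep, hhead, sepSpec]
    simp only [beq_self_eq_true, if_true]
    rw [← hhead, ih]
    have : (List.replicate (n + 2) c).intersperse 'x'
        = c :: 'x' :: (List.replicate (n + 1) c).intersperse 'x' := by
      rw [show List.replicate (n + 2) c = c :: c :: List.replicate n c by simp [List.replicate_succ],
          show (c :: List.replicate n c) = List.replicate (n + 1) c by simp [List.replicate_succ]]
      rw [show List.replicate (n + 1) c = c :: List.replicate n c by simp [List.replicate_succ]]
      simp [List.intersperse]
    rw [this]; simp

-- the outer loop, flattened, computes sepSpec
theorem sepOuterLoop_eq (n : Nat) (rest : List Char) (parts : List (List Char))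
    (hn : rest.length ≤ n) :
    (sepOuterLoop rest parts).flatten = parts.flatten ++ sepSpec rest := by
  induction n generalizing rest parts with
  | zero =>
    have : rest = [] := by cases rest <;> simp_all
    subst this
    rw [sepOuterLoop.eq_def]; simp [sepSpec]
  | succ n ih =>
    cases rest with
    | nil => rw [sepOuterLoop.eq_def]; simp [sepSpec]
    | cons a tl =>
      rw [sepOuterLoop.eq_def]
      rw [dif_neg (by simp : ¬ (a :: tl) = [])]
      simp only
      set c := (a :: tl).getD 0 ' ' with hc
      set k := runLenLoop (a :: tl) c 0 with hk
      set L := ((a :: tl).takeWhile (· == c)).length with hL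
      have hkeq : k = L := by rw [hk, hL, runLenLoop_eq]; simp
      have htake : (a :: tl).take k = (a :: tl).takeWhile (· == c) := by
        rw [hkeq, hL]; exact take_len_takeWhile _ _
      have hdrop : (a :: tl).drop k = (a :: tl).dropWhile (· == c) := by
        rw [hkeq, hL]; exact drop_len_takeWhile _ _
      have hpos : 1 ≤ k := by rw [hk]; exact runLenLoop_pos _ (by simp)
      obtain ⟨m, hm⟩ : ∃ m, L = m + 1 := ⟨L - 1, by omega⟩
      have hrep : (a :: tl).takeWhile (· == c) = List.replicate (m + 1) c := by
        rw [← hm, hL]; exact takeWhile_eq_replicate _ _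
      have hrec := ih ((a :: tl).drop k) (parts ++ [((a :: tl).take k).intersperse 'x'])
        (by simp only [List.length_drop, List.length_cons] at hn ⊢; omega)
      rw [hrec]
      have hsplit : a :: tl = List.replicate (m + 1) c ++ (a :: tl).dropWhile (· == c) := by
        conv_lhs => rw [← List.takeWhile_append_dropWhile (p := (· == c)) (l := a :: tl)]
        rw [hrep]
      have hrun := sepSpec_run m c ((a :: tl).dropWhile (· == c))
        (fun y ys hy => head_dropWhile_ne (a :: tl) c y ys hy)
      rw [htake, hrep, hdrop]
      conv_rhs => rw [hsplit]
      rw [hrun]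
      simp

-- ===== VERDICT (by name: the statement is the Claim_ definition above) =====
theorem separateIdentical_spec : Claim_equal_separateIdentical := by
  intro message _
  unfold Spec_separateIdentical separateIdentical separateIdentical_alt
  rw [loop_eq_spec (message.toList) _ 0 [] (by simp),
      sepOuterLoop_eq (message.toList.length) _ _ (le_refl _)]
  simp
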